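-- pv_equiv track=rewrite | github.com/Jam-Cai/DMOJ_Solutions | ccc_2005_j5.py | banaRecur
-- ===== SOURCE A (Python) =====
-- def banaRecur(word):
--     if word == "A":
--         return "YES"
--     if "ANA" not in word and "BAS" not in word:
--         return "NO"
--     else:
--         word = word.replace("ANA","A")
--         word = word.replace("BAS","A")
--         return(banaRecur(word))
-- ===== SOURCE B (Python) =====
-- def banaRecur(word):
--     while "ANA" in word or "BAS" in word:
--         word = word.replace("ANA", "A").replace("BAS", "A")
--     return "YES" if word == "A" else "NO"
-- ===== Notes on version B (the rewrite author's own statement) =====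
-- stated objective: simpler
-- what changed: Replaced the recursive reduce-and-recurse (with the YES/NO tests re-done inside every call) by a plain while-loop that reduces until neither pattern occurs and decides YES/NO once at the end; no Python recursion, so no recursion-depth limit.
import Mathlib
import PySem

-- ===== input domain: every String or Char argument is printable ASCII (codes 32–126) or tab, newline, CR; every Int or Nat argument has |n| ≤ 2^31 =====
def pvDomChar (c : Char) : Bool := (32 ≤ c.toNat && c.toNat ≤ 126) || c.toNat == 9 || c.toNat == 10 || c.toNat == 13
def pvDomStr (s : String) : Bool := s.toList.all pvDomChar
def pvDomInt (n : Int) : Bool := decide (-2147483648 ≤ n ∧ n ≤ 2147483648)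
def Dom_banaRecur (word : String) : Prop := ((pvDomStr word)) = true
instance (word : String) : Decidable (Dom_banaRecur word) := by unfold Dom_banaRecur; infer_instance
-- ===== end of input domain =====

-- B replaces A's recursion by an iterative reduce-until-fixed loop with a single YES/NO decision at the end (simpler; return value identical).

-- ===== PORT A =====
-- A's recursion, with a fuel totality guard: each recursive call is made only after
-- a replacement that strictly shortens the word, so fuel = length + 1 is never
-- exhausted; the fuel-0 branch is unreachable.
def banaRecurGo : Nat → String → String
  | 0, w => if w == "A" then "YES" else "NO"
  | n + 1, w =>
      if w == "A" then "YES"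
      else if !(PySem.Str.isIn "ANA" w) && !(PySem.Str.isIn "BAS" w) then "NO"
      else banaRecurGo n (PySem.Str.replace (PySem.Str.replace w "ANA" "A") "BAS" "A")

def banaRecur (word : String) : String :=
  banaRecurGo (word.toList.length + 1) word

-- ===== PORT B =====
-- B's while-loop, same fuel guard (one unit per loop iteration, each shortening the word).
def banaRecurLoop : Nat → String → String
  | 0, w => w
  | n + 1, w =>
      if PySem.Str.isIn "ANA" w || PySem.Str.isIn "BAS" w then
        banaRecurLoop n (PySem.Str.replace (PySem.Str.replace w "ANA" "A") "BAS" "A")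
      else w

def banaRecur_alt (word : String) : String :=
  let w := banaRecurLoop (word.toList.length + 1) word
  if w == "A" then "YES" else "NO"

-- ===== PRECONDITION & SPEC =====
def Spec_banaRecur (word : String) (out : String) : Prop := out = banaRecur_alt word
instance (word : String) (out : String) : Decidable (Spec_banaRecur word out) := by unfold Spec_banaRecur; infer_instance

-- ===== CLAIM (what is proved, stated in full; the proofs are below) =====
def Claim_equal_banaRecur : Prop := ∀ (word : String), Dom_banaRecur word → Spec_banaRecur word (banaRecur word)

-- ===== LEMMAS AND PROOFS =====

theorem banaRecurGo_eq_loop (n : Nat) :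
    ∀ w : String, banaRecurGo n w = (if banaRecurLoop n w == "A" then "YES" else "NO") := by
  induction n with
  | zero => intro w; rfl
  | succ n ih =>
    intro w
    by_cases h : w = "A"
    · subst h
      simp [banaRecurGo, banaRecurLoop,
        show PySem.Chars.isIn ['A', 'N', 'A'] ['A'] = false from rfl,
        show PySem.Chars.isIn ['B', 'A', 'S'] ['A'] = false from rfl]
    · have hw : (w == "A") = false := by simpa using h
      by_cases hA : PySem.Chars.isIn ['A', 'N', 'A'] w.toList = true <;>
        by_cases hB : PySem.Chars.isIn ['B', 'A', 'S'] w.toList = true <;>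
        simp [banaRecurGo, banaRecurLoop, hw, hA, hB, ih] at *

-- ===== VERDICT (by name: the statement is the Claim_ definition above) =====
theorem banaRecur_spec : Claim_equal_banaRecur := by
  intro word _
  show banaRecur word = banaRecur_alt word
  simpa [banaRecur, banaRecur_alt] using banaRecurGo_eq_loop (word.toList.length + 1) word
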